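-- pv_equiv track=rewrite | github.com/bruno-fs/genial | genial/utils.py | format_intervals
-- ===== SOURCE A (Python) =====
-- def format_intervals(iterable_with_numbers):
--     n_list = sorted(iterable_with_numbers)
--     dist = 0
--     curr = n_list[0]
--     intervals = []
--
--     for i, n in enumerate(n_list):
--         if n - curr != dist:
--             next_n = n_list[i - 1]
--
--             if next_n - curr == 0:
--                 intervals.append(str(curr))
--
--             elif next_n - curr == 1:
--                 intervals.append(str(curr))
--                 intervals.append(str(next_n))
--
--             else:
--                 intervals.append('%d-%d' % (curr, next_n))
--
--             curr = n
--             dist = 1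
--
--         else:
--             dist += 1
--
--     if n - curr == 0:
--         intervals.append(str(curr))
--
--     elif n - curr == 1:
--         intervals.append(str(curr))
--         intervals.append(str(n))
--
--     else:
--         intervals.append('%d-%d' % (curr, n))
--
--     return intervals
-- ===== SOURCE B (Python) =====
-- def _merge(left, right):
--     """Concatenate two nonempty run lists, fusing the boundary runs if consecutive."""
--     (a, b), (c, d) = left[-1], right[0]
--     if c - b == 1:
--         return left[:-1] + [(a, d)] + right[1:]
--     return left + right
--
--
-- def _runs(s, lo, hi):
--     """Maximal consecutive (+1) runs of s[lo:hi] as (first, last) pairs, divide and conquer."""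
--     if hi - lo == 0:
--         return []
--     if hi - lo == 1:
--         return [(s[lo], s[lo])]
--     mid = (lo + hi) // 2
--     return _merge(_runs(s, lo, mid), _runs(s, mid, hi))
--
--
-- def _fmt(a, b):
--     if a == b:
--         return [str(a)]
--     if b - a == 1:
--         return [str(a), str(b)]
--     return ['%d-%d' % (a, b)]
--
--
-- def format_intervals(iterable_with_numbers):
--     s = sorted(iterable_with_numbers)
--     out = []
--     for a, b in _runs(s, 0, len(s)):
--         out += _fmt(a, b)
--     return out
-- ===== Notes on version B (the rewrite author's own statement) =====
-- stated objective: alternative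
-- what changed: Replaces A's stateful left-to-right scan (dist counter, n_list[i-1] re-lookup, leaked loop variable) by a divide-and-conquer pass that recursively splits the sorted list, computes each half's maximal consecutive runs as (first,last) pairs, fuses the two boundary runs on merge, and formats the run pairs in a separate final pass.
-- outside the precondition, e.g. on format_intervals([]): A raises IndexError, B returns []
import Mathlib
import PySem

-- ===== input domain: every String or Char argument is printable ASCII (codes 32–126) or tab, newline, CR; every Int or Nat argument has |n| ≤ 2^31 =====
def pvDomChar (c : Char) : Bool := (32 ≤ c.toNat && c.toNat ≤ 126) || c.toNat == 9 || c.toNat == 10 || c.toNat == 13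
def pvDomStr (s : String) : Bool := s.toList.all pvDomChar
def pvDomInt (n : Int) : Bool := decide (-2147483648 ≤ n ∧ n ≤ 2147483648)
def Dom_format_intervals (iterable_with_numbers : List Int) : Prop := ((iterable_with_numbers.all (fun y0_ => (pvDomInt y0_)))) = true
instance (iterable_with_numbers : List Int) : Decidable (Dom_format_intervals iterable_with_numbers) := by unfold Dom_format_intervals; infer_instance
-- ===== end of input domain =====

-- B replaces A's stateful left-to-right scan (dist counter, n_list[i-1] re-lookup) by a
-- divide-and-conquer decomposition of the sorted list into maximal consecutive runs
-- ((first,last) pairs, boundary runs fused on merge), formatted in a separate final pass;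
-- objective: alternative. A raises IndexError on [] (excluded by Pre_); B returns [] there.

-- ===== PORT A =====
-- one iteration of A's for-loop; state = (dist, curr, n, intervals) where n is the loop variable
-- (Python's n leaks out of the loop and is read by the trailing if/elif/else)
def pvAStep (s : List Int) (st : Int × Int × Int × List String) (p : Int × Int) :
    Int × Int × Int × List String :=
  let (dist, curr, _, intervals) := st
  let (i, n) := p
  if n - curr ≠ dist then
    -- n_list[i-1]: in range whenever this line runs (i ≥ 1 here, and i-1 = -1 would wrap on a
    -- nonempty list anyway); .getD 0 is unreachable
    let next_n := (PySem.List.pyGet? s (i - 1)).getD 0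
    let intervals :=
      if next_n - curr = 0 then intervals ++ [PySem.Int.toStr curr]
      else if next_n - curr = 1 then
        intervals ++ [PySem.Int.toStr curr, PySem.Int.toStr next_n]
      else intervals ++ [PySem.Int.toStr curr ++ "-" ++ PySem.Int.toStr next_n]
    (1, n, n, intervals)
  else (dist + 1, curr, n, intervals)

-- the trailing if/elif/else of A, applied to the loop's final state
def pvAFin (st : Int × Int × Int × List String) : List String :=
  let (_, curr, n, intervals) := st
  if n - curr = 0 then intervals ++ [PySem.Int.toStr curr]
  else if n - curr = 1 then intervals ++ [PySem.Int.toStr curr, PySem.Int.toStr n]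
  else intervals ++ [PySem.Int.toStr curr ++ "-" ++ PySem.Int.toStr n]

def format_intervals (iterable_with_numbers : List Int) : List String :=
  let s := PySem.List.sorted iterable_with_numbers (fun x => x)
  match s with
  | [] => []  -- Python raises IndexError indexing the first element; excluded by Pre_
  | c0 :: _ =>
    pvAFin ((PySem.List.enumerate s).foldl (pvAStep s) (0, c0, 0, []))

-- ===== PORT B =====
-- _merge of Source B: fuse the boundary runs of two run lists if consecutive.
-- Source B unpacks left[-1], right[0] directly (both halves are nonempty at every call site);
-- the fallback arm of the match is unreachable there.
def pvMergeRuns (left right : List (Int × Int)) : List (Int × Int) :=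
  match left.getLast?, right.head? with
  | some (a, b), some (c, d) =>
      if c - b = 1 then left.dropLast ++ [(a, d)] ++ right.tail
      else left ++ right
  | _, _ => left ++ right

-- _runs of Source B: maximal consecutive (+1) runs of s[lo:hi], divide and conquer.
-- fuel is only a structural decreasing measure (fuel >= hi - lo at every call, so the
-- fuel-0 arm is unreachable); the computation is exactly Source B's.
def pvRunsGo (fuel : Nat) (s : List Int) (lo hi : Nat) : List (Int × Int) :=
  if hi - lo = 0 then []
  else if hi - lo = 1 then
    let x := (PySem.List.pyGet? s (lo : Int)).getD 0  -- s[lo], in range at every call site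
    [(x, x)]
  else
    match fuel with
    | 0 => []  -- unreachable
    | f + 1 => pvMergeRuns (pvRunsGo f s lo ((lo + hi) / 2)) (pvRunsGo f s ((lo + hi) / 2) hi)

def pvRuns (s : List Int) (lo hi : Nat) : List (Int × Int) := pvRunsGo (hi - lo) s lo hi

-- _fmt of Source B
def pvFmtRun (a b : Int) : List String :=
  if a = b then [PySem.Int.toStr a]
  else if b - a = 1 then [PySem.Int.toStr a, PySem.Int.toStr b]
  else [PySem.Int.toStr a ++ "-" ++ PySem.Int.toStr b]

def format_intervals_alt (iterable_with_numbers : List Int) : List String :=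
  let s := PySem.List.sorted iterable_with_numbers (fun x => x)
  (pvRuns s 0 s.length).foldl (fun out p => out ++ pvFmtRun p.1 p.2) []

-- ===== PRECONDITION & SPEC =====
-- A raises IndexError indexing the first element of the empty list; Pre_ excludes exactly that input
def Pre_format_intervals (iterable_with_numbers : List Int) : Prop :=
  iterable_with_numbers ≠ []
instance (iterable_with_numbers : List Int) : Decidable (Pre_format_intervals iterable_with_numbers) := by unfold Pre_format_intervals; infer_instance

def pvWitness_format_intervals : List Int := [3, 1, 2, 7]

def Spec_format_intervals (iterable_with_numbers : List Int) (out : List String) : Prop := out = format_intervals_alt iterable_with_numbers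
instance (iterable_with_numbers : List Int) (out : List String) : Decidable (Spec_format_intervals iterable_with_numbers out) := by unfold Spec_format_intervals; infer_instance

-- ===== CLAIM (what is proved, stated in full; the proofs are below) =====
def Claim_equal_format_intervals : Prop := ∀ (iterable_with_numbers : List Int), Dom_format_intervals iterable_with_numbers → Pre_format_intervals iterable_with_numbers → Spec_format_intervals iterable_with_numbers (format_intervals iterable_with_numbers)


-- ===== LEMMAS AND PROOFS =====

-- linear characterisation of the run decomposition, used to relate both ports
def pvConsRun (a b : Int) : List (Int × Int) → List (Int × Int)
  | [] => [(a, b)]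
  | (c, d) :: rest => if c - b = 1 then (a, d) :: rest else (a, b) :: (c, d) :: rest

def pvRunsLin : List Int → List (Int × Int)
  | [] => []
  | x :: t => pvConsRun x x (pvRunsLin t)

def pvFmtAll (R : List (Int × Int)) : List String := R.flatMap (fun p => pvFmtRun p.1 p.2)

-- ---- A-side: the scan equals pvFmtAll ∘ pvRunsLin ----

-- B-style linear scan, the intermediate form A's fold is reduced to
def pvBLoop : List Int → Int → Int → List String → List String
  | [], start, prev, out => out ++ pvFmtRun start prev
  | n :: rest, start, prev, out =>
    if n - prev ≠ 1 then pvBLoop rest n n (out ++ pvFmtRun start prev)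
    else pvBLoop rest start n out

lemma pvFinEq (curr prev : Int) (acc : List String) :
    (if prev - curr = 0 then acc ++ [PySem.Int.toStr curr]
     else if prev - curr = 1 then acc ++ [PySem.Int.toStr curr, PySem.Int.toStr prev]
     else acc ++ [PySem.Int.toStr curr ++ "-" ++ PySem.Int.toStr prev])
      = acc ++ pvFmtRun curr prev := by
  unfold pvFmtRun
  rcases eq_or_ne curr prev with h | h
  · subst h; simp
  · have h0 : prev - curr ≠ 0 := by omega
    rw [if_neg h0, if_neg h]
    by_cases h1 : prev - curr = 1
    · rw [if_pos h1, if_pos h1]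
    · rw [if_neg h1, if_neg h1]

lemma pvGetFromDrop (s : List Int) (i : Nat) (p : Int) (t : List Int)
    (h : s.drop i = p :: t) : PySem.List.pyGet? s (i : Int) = some p := by
  rw [PySem.List.pyGet?_natCast]
  have h0 : (s.drop i)[0]? = s[i + 0]? := List.getElem?_drop
  rw [h] at h0; simpa using h0.symm

-- A's loop state relates to the linear scan: prev (the element just processed, = Python's
-- leaked n) equals curr + dist - 1, and s[i-1] is prev
lemma pvKey (t : List Int) : ∀ (s : List Int) (i : Nat) (curr prev dist : Int)
    (acc : List String), 1 ≤ i → s.drop (i - 1) = prev :: t → prev = curr + dist - 1 →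
    pvAFin ((PySem.List.enumerate t (i : Int)).foldl (pvAStep s) (dist, curr, prev, acc))
      = pvBLoop t curr prev acc := by
  induction t with
  | nil =>
    intro s i curr prev dist acc _ _ hprev
    simp only [PySem.List.enumerate_nil, List.foldl_nil, pvAFin, pvBLoop]
    exact pvFinEq curr prev acc
  | cons n t' ih =>
    intro s i curr prev dist acc hi hdrop hprev
    rw [PySem.List.enumerate_cons, List.foldl_cons]
    have hdropi : s.drop i = n :: t' := by
      have : s.drop i = (s.drop (i - 1)).drop 1 := by
        rw [List.drop_drop]; congr 1; omega
      rw [this, hdrop]; rfl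
    have hget : PySem.List.pyGet? s ((i : Int) - 1) = some prev := by
      have : ((i : Int) - 1) = ((i - 1 : Nat) : Int) := by omega
      rw [this]; exact pvGetFromDrop s (i - 1) prev (n :: t') hdrop
    by_cases hc : n - curr ≠ dist
    · have hc' : n - prev ≠ 1 := by omega
      have hstep : pvAStep s (dist, curr, prev, acc) ((i : Int), n)
          = (1, n, n, acc ++ pvFmtRun curr prev) := by
        simp only [pvAStep, hget, Option.getD_some, if_pos hc]
        rw [pvFinEq]
      rw [hstep, show ((i : Int) + 1) = ((i + 1 : Nat) : Int) by omega,
        ih s (i + 1) n n 1 _ (by omega) (by simpa using hdropi) (by omega)]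
      simp only [pvBLoop, if_pos hc']
    · have hc' : ¬ (n - prev ≠ 1) := by omega
      have hstep : pvAStep s (dist, curr, prev, acc) ((i : Int), n)
          = (dist + 1, curr, n, acc) := by
        simp only [pvAStep, if_neg hc]
      rw [hstep, show ((i : Int) + 1) = ((i + 1 : Nat) : Int) by omega,
        ih s (i + 1) curr n (dist + 1) acc (by omega) (by simpa using hdropi) (by omega)]
      simp only [pvBLoop, if_neg hc']

-- pvConsRun composition identities
lemma pvConsRun_fuse (a b n : Int) (R : List (Int × Int)) (h : n - b = 1) :
    pvConsRun a b (pvConsRun n n R) = pvConsRun a n R := by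
  cases R with
  | nil => simp [pvConsRun, h]
  | cons p rest =>
    rcases p with ⟨c, d⟩
    by_cases hc : c - n = 1 <;> simp [pvConsRun, hc, h]

lemma pvConsRun_break (a b n : Int) (R : List (Int × Int)) (h : n - b ≠ 1) :
    pvConsRun a b (pvConsRun n n R) = (a, b) :: pvConsRun n n R := by
  cases R with
  | nil => simp [pvConsRun, h]
  | cons p rest =>
    rcases p with ⟨c, d⟩
    by_cases hc : c - n = 1 <;> simp [pvConsRun, hc, h]

-- the linear scan computes pvFmtAll of the run decomposition
lemma pvBLoop_eq (t : List Int) : ∀ (a b : Int) (acc : List String),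
    pvBLoop t a b acc = acc ++ pvFmtAll (pvConsRun a b (pvRunsLin t)) := by
  induction t with
  | nil => intro a b acc; simp [pvBLoop, pvRunsLin, pvConsRun, pvFmtAll]
  | cons n t' ih =>
    intro a b acc
    show pvBLoop (n :: t') a b acc = _
    rw [show pvRunsLin (n :: t') = pvConsRun n n (pvRunsLin t') from rfl]
    by_cases hc : n - b ≠ 1
    · rw [pvConsRun_break a b n _ hc]
      simp only [pvBLoop, if_pos hc, ih]
      simp [pvFmtAll]
    · rw [not_not] at hc
      rw [pvConsRun_fuse a b n _ hc]
      simp only [pvBLoop, hc]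
      simp [ih]

-- ---- B-side: divide and conquer equals pvRunsLin ----

-- pvConsRun commutes with merging on the right
lemma pvConsRun_merge (x : Int) (L R : List (Int × Int)) :
    pvConsRun x x (pvMergeRuns L R) = pvMergeRuns (pvConsRun x x L) R := by
  cases L with
  | nil =>
    cases R with
    | nil => simp [pvMergeRuns, pvConsRun]
    | cons p R' =>
      rcases p with ⟨e, f⟩
      by_cases he : e - x = 1 <;>
        simp [pvMergeRuns, pvConsRun, he]
  | cons q L' =>
    rcases q with ⟨c, d⟩
    cases R with
    | nil =>
      cases L' with
      | nil => by_cases hc : c - x = 1 <;> simp [pvMergeRuns, pvConsRun, hc]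
      | cons q' L'' => by_cases hc : c - x = 1 <;> simp [pvMergeRuns, pvConsRun, hc]
    | cons p R' =>
      rcases p with ⟨e, f⟩
      cases L' with
      | nil =>
        by_cases hc : c - x = 1 <;> by_cases he : e - d = 1 <;>
          simp [pvMergeRuns, pvConsRun, hc, he]
      | cons q' L'' =>
        rcases q' with ⟨c', d'⟩
        have hlast : ((c, d) :: (c', d') :: L'').getLast? = ((c', d') :: L'').getLast? :=
          List.getLast?_cons_cons
        rcases hL : ((c', d') :: L'').getLast? with _ | ⟨a, b⟩
        · simp at hL
        · by_cases hc : c - x = 1 <;> by_cases he : e - b = 1 <;>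
            simp [pvMergeRuns, pvConsRun, hc, he, hlast, hL, List.dropLast_cons_of_ne_nil]
  
lemma pvMergeRuns_nil_left (R : List (Int × Int)) : pvMergeRuns [] R = R := by
  cases R with
  | nil => rfl
  | cons p R' => rcases p with ⟨c, d⟩; rfl

-- run decomposition of a concatenation = merge of the run decompositions
lemma pvRunsLin_append (u v : List Int) :
    pvRunsLin (u ++ v) = pvMergeRuns (pvRunsLin u) (pvRunsLin v) := by
  induction u with
  | nil =>
    show pvRunsLin v = pvMergeRuns (pvRunsLin []) (pvRunsLin v)
    rw [show pvRunsLin ([] : List Int) = [] from rfl, pvMergeRuns_nil_left]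
  | cons x u' ih =>
    show pvConsRun x x (pvRunsLin (u' ++ v)) = pvMergeRuns (pvConsRun x x (pvRunsLin u')) _
    rw [ih, pvConsRun_merge]

-- pvRuns computes pvRunsLin on the slice
lemma pvRunsGo_eq (s : List Int) : ∀ (fuel lo hi : Nat), hi - lo ≤ fuel → hi ≤ s.length →
    pvRunsGo fuel s lo hi = pvRunsLin ((s.drop lo).take (hi - lo)) := by
  intro fuel
  induction fuel with
  | zero =>
    intro lo hi hf hhi
    have h0 : hi - lo = 0 := by omega
    simp [pvRunsGo, h0, pvRunsLin]
  | succ f ihf =>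
    intro lo hi hf hhi
    rw [pvRunsGo]
    by_cases h0 : hi - lo = 0
    · simp [h0, pvRunsLin]
    · rw [if_neg h0]
      by_cases h1 : hi - lo = 1
      · have hlt : lo < s.length := by omega
        have htake : (s.drop lo).take (hi - lo) = [s[lo]] := by
          rw [h1]; exact List.take_one_drop_eq_of_lt_length hlt
        rw [if_pos h1, htake]
        simp [PySem.List.pyGet?_natCast, List.getElem?_eq_getElem hlt, pvRunsLin, pvConsRun]
      · rw [if_neg h1]
        rw [ihf lo ((lo + hi) / 2) (by omega) (by omega),
          ihf ((lo + hi) / 2) hi (by omega) hhi, ← pvRunsLin_append]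
        have hdd : (s.drop lo).drop ((lo + hi) / 2 - lo) = s.drop ((lo + hi) / 2) := by
          rw [List.drop_drop]; congr 1; omega
        have hsplit : hi - lo = ((lo + hi) / 2 - lo) + (hi - (lo + hi) / 2) := by omega
        rw [hsplit, List.take_add, hdd]

lemma pvRuns_eq (s : List Int) (lo hi : Nat) (hhi : hi ≤ s.length) :
    pvRuns s lo hi = pvRunsLin ((s.drop lo).take (hi - lo)) :=
  pvRunsGo_eq s (hi - lo) lo hi (le_refl _) hhi

-- ===== VERDICT (by name: the statement is the Claim_ definition above) =====
theorem format_intervals_spec : Claim_equal_format_intervals := by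
  intro xs _ _
  unfold Spec_format_intervals format_intervals format_intervals_alt
  cases hs : PySem.List.sorted xs (fun x => x) with
  | nil => simp [pvRuns, pvRunsGo]
  | cons c0 rest =>
    simp only
    have hB : (pvRuns (c0 :: rest) 0 (c0 :: rest).length).foldl
        (fun out p => out ++ pvFmtRun p.1 p.2) [] = pvFmtAll (pvRunsLin (c0 :: rest)) := by
      rw [pvRuns_eq (c0 :: rest) 0 ((c0 :: rest).length) (le_refl _)]
      simp only [List.drop_zero, Nat.sub_zero, List.take_length]
      rw [PySem.List.foldl_append_eq_flatMap]
      simp [pvFmtAll]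
    rw [hB, PySem.List.enumerate_cons, List.foldl_cons]
    have h0 : pvAStep (c0 :: rest) (0, c0, 0, []) (0, c0) = (1, c0, c0, []) := by
      simp [pvAStep]
    rw [h0]
    have hA := pvKey rest (c0 :: rest) 1 c0 c0 1 [] (by omega) (by simp) (by omega)
    rw [pvBLoop_eq] at hA
    simpa [pvFmtAll, pvRunsLin] using hA
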